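-- pv_equiv track=rewrite | github.com/poovarasanW2814/ETL | scripts/prompt_tester_benchmark.py | build_values
-- ===== SOURCE A (Python) =====
-- def build_values(total_values: int) -> list[str | None]:
--     """Generate a large mixed-format date column."""
--
--     values: list[str | None] = []
--     for index in range(total_values):
--         match index % 12:
--             case 0:
--                 values.append("15-01-2024")
--             case 1:
--                 values.append("2024/01/16")
--             case 2:
--                 values.append("Jan 17 2024")
--             case 3:
--                 values.append("January 18, 2024")
--             case 4:
--                 values.append("20240119")
--             case 5:
--                 values.append("2024-01-20")
--             case 6:
--                 values.append("2024-01-21 10:30:00")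
--             case 7:
--                 values.append("2024-01-22T11:45:30Z")
--             case 8:
--                 values.append("23/01/2024")
--             case 9:
--                 values.append("01-24-2024")
--             case 10:
--                 values.append("")
--             case _:
--                 values.append(None)
--     return values
-- ===== SOURCE B (Python) =====
-- _CYCLE = [
--     "15-01-2024",
--     "2024/01/16",
--     "Jan 17 2024",
--     "January 18, 2024",
--     "20240119",
--     "2024-01-20",
--     "2024-01-21 10:30:00",
--     "2024-01-22T11:45:30Z",
--     "23/01/2024",
--     "01-24-2024",
--     "",
--     None,
-- ]
--
--
-- def build_values(total_values: int) -> list[str | None]: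
--     """Generate a large mixed-format date column by tiling a 12-value table."""
--     n = max(0, total_values)
--     q, r = divmod(n, 12)
--     return _CYCLE * q + _CYCLE[:r]
-- ===== Notes on version B (the rewrite author's own statement) =====
-- stated objective: simpler
-- what changed: Replaced the per-index loop with a twelve-way match statement by a fixed table tiled with divmod (_CYCLE * q + _CYCLE[:r], clamping negative counts); list repetition replaces per-element branching and appending.
import Mathlib
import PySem

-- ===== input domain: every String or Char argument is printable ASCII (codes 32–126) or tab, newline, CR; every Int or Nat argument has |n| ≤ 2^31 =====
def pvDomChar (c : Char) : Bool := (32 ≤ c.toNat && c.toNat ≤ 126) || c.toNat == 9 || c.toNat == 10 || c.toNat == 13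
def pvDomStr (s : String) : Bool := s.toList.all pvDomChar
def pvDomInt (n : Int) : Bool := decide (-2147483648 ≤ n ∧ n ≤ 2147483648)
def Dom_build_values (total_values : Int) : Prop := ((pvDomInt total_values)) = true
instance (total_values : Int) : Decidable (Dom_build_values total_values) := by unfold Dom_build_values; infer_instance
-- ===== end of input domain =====

-- B replaces A's twelve match branches by a 12-element table tiled with divmod (objective: simpler).

-- ===== PORT A =====
-- loop body of A's for-loop: the 12-way match on index % 12, branches in source order
def buildStep (values : List (Option String)) (index : Int) : List (Option String) :=
  let m := PySem.Int.mod index 12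
  if m = 0 then values ++ [some "15-01-2024"]
  else if m = 1 then values ++ [some "2024/01/16"]
  else if m = 2 then values ++ [some "Jan 17 2024"]
  else if m = 3 then values ++ [some "January 18, 2024"]
  else if m = 4 then values ++ [some "20240119"]
  else if m = 5 then values ++ [some "2024-01-20"]
  else if m = 6 then values ++ [some "2024-01-21 10:30:00"]
  else if m = 7 then values ++ [some "2024-01-22T11:45:30Z"]
  else if m = 8 then values ++ [some "23/01/2024"]
  else if m = 9 then values ++ [some "01-24-2024"]
  else if m = 10 then values ++ [some ""]
  else values ++ [none]

def build_values (total_values : Int) : List (Option String) :=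
  (PySem.List.pyRange 0 total_values 1).foldl buildStep []

-- ===== PORT B =====
def pvCycle : List (Option String) :=
  [some "15-01-2024", some "2024/01/16", some "Jan 17 2024", some "January 18, 2024",
   some "20240119", some "2024-01-20", some "2024-01-21 10:30:00", some "2024-01-22T11:45:30Z",
   some "23/01/2024", some "01-24-2024", some "", none]

def build_values_alt (total_values : Int) : List (Option String) :=
  let n := max 0 total_values
  let q := PySem.Int.floordiv n 12
  let r := PySem.Int.mod n 12
  (List.replicate q.toNat pvCycle).flatten ++ pvCycle.take r.toNat

-- ===== PRECONDITION & SPEC =====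
def Spec_build_values (total_values : Int) (out : List (Option String)) : Prop := out = build_values_alt total_values
instance (total_values : Int) (out : List (Option String)) : Decidable (Spec_build_values total_values out) := by unfold Spec_build_values; infer_instance

-- ===== CLAIM (what is proved, stated in full; the proofs are below) =====
def Claim_equal_build_values : Prop := ∀ (total_values : Int), Dom_build_values total_values → Spec_build_values total_values (build_values total_values)

-- ===== LEMMAS AND PROOFS =====

theorem pv_step_eq (acc : List (Option String)) (k : Nat) :
    buildStep acc (k : Int) = acc ++ [pvCycle.getD (k % 12) none] := by
  have h12 : k % 12 < 12 := Nat.mod_lt _ (by omega)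
  unfold buildStep
  rw [show (12:Int) = ((12:Nat):Int) from rfl, PySem.Int.mod_natCast]
  set m := k % 12 with hm
  clear_value m
  interval_cases m <;> simp [pvCycle]

theorem pv_A_nat (k : Nat) :
    build_values (k : Int) = (List.range k).map (fun i => pvCycle.getD (i % 12) none) := by
  induction k with
  | zero => simp [build_values, PySem.List.pyRange_one_eq_nil]
  | succ k ih =>
    have : ((k : Int) + 1) = ((k + 1 : Nat) : Int) := by push_cast; ring
    rw [build_values, ← this, PySem.List.pyRange_one_succ_right (by positivity),
        List.foldl_append]
    simp only [List.foldl_cons, List.foldl_nil]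
    rw [← build_values, ih, pv_step_eq, List.range_succ, List.map_append]
    rfl

theorem pv_tile_nat (k : Nat) :
    (List.range k).map (fun i => pvCycle.getD (i % 12) none)
      = (List.replicate (k / 12) pvCycle).flatten ++ pvCycle.take (k % 12) := by
  induction k with
  | zero => rfl
  | succ k ih =>
    rw [List.range_succ, List.map_append, ih]
    simp only [List.map_cons, List.map_nil]
    have h12 : k % 12 < 12 := Nat.mod_lt _ (by omega)
    by_cases h : k % 12 = 11
    · have hq : (k + 1) / 12 = k / 12 + 1 := by omega
      have hr : (k + 1) % 12 = 0 := by omega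
      rw [hq, hr, h, List.replicate_succ', List.flatten_append]
      simp [pvCycle]
    · have hq : (k + 1) / 12 = k / 12 := by omega
      have hr : (k + 1) % 12 = k % 12 + 1 := by omega
      rw [hq, hr, List.append_assoc]
      congr 1
      set r := k % 12 with hrr
      clear_value r
      interval_cases r
      · rfl
      · rfl
      · rfl
      · rfl
      · rfl
      · rfl
      · rfl
      · rfl
      · rfl
      · rfl
      · rfl
      · exact absurd rfl h

-- ===== VERDICT (by name: the statement is the Claim_ definition above) =====
theorem build_values_spec : Claim_equal_build_values := by
  intro n _
  show build_values n = build_values_alt n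
  by_cases h : 0 ≤ n
  · obtain ⟨k, rfl⟩ := Int.eq_ofNat_of_zero_le h
    rw [pv_A_nat, pv_tile_nat, build_values_alt]
    have hmax : max 0 (k : Int) = (k : Int) := by omega
    rw [hmax, show (12:Int) = ((12:Nat):Int) from rfl, PySem.Int.floordiv_natCast, PySem.Int.mod_natCast,
        Int.toNat_natCast, Int.toNat_natCast]
  · rw [build_values, PySem.List.pyRange_one_eq_nil (by omega), build_values_alt]
    have hmax : max 0 n = 0 := by omega
    rw [hmax]
    rfl
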